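-- pv_equiv track=rewrite | github.com/visaplan/visaplan.tools | src/visaplan/tools/sequences.py | inject_indexes
-- ===== SOURCE A (Python) =====
-- def inject_indexes(seq, missing=None):
--     """
--     Iteriere über eine Sequenz und generiere 4-Tupel:
--     - das Listenelement
--     - voriger Index (für das erste Element: None)
--     - aktuellen Index (für das erste Element: 0)
--     - nächster Index (für das letzte Element: None)
--
--     >>> list(inject_indexes('ABC'))
--     [('A', None, 0, 1), ('B', 0, 1, 2), ('C', 1, 2, None)]
--
--     >>> list(inject_indexes(''))
--     []
--     """
--     first = True
--     prev_item = None
--     prev_idx = missing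
--     idx = 0
--     for item in seq:
--         if first:
--             prev_idx = missing
--             prev_item = item
--             first = False
--             continue
--         yield (prev_item, prev_idx, idx, idx+1)
--         prev_item = item
--         prev_idx = idx
--         idx += 1
--
--     if not first:
--         yield (prev_item, prev_idx, idx, missing)
-- ===== SOURCE B (Python) =====
-- def inject_indexes(seq, missing=None):
--     items = list(seq)
--     n = len(items)
--     for i, item in enumerate(items):
--         yield (item,
--                missing if i == 0 else i - 1,
--                i,
--                missing if i == n - 1 else i + 1)
-- ===== Notes on version B (the rewrite author's own statement) =====
-- stated objective: simpler
-- what changed: B materializes the sequence, takes its length up front, and emits each tuple directly from the index in one enumerate pass, removing A's first-flag / held-previous-item / delayed-yield machinery.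
import Mathlib
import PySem

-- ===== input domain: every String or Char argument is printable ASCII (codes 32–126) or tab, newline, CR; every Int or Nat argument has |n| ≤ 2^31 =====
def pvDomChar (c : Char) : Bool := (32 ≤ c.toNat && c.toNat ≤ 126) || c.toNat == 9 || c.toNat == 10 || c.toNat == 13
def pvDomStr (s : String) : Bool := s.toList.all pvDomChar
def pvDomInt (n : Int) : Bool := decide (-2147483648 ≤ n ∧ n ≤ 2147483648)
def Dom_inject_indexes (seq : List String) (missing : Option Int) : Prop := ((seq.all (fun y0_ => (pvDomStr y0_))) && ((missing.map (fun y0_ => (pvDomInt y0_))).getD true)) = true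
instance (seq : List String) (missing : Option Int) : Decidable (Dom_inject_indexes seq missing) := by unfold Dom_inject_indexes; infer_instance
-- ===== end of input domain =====

-- B replaces A's first-flag / held-previous-item delayed-yield loop by a single
-- length-aware enumerate pass that emits each tuple directly from its index (simpler).


-- ===== PORT A =====
-- A's loop after the first element: yield the held (prev_item, prev_idx) with the
-- current idx, then shift; at the end (if anything was seen) yield the final held
-- element with next = missing.
def injectIndexesGo (missing : Option Int) (prev_item : String) (prev_idx : Option Int)
    (idx : Int) : List String → List (String × Option Int × Int × Option Int)
  | [] => [(prev_item, prev_idx, idx, missing)]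
  | item :: rest =>
      (prev_item, prev_idx, idx, some (idx + 1)) :: injectIndexesGo missing item (some idx) (idx + 1) rest

def inject_indexes (seq : List String) (missing : Option Int) : List (String × Option Int × Int × Option Int) :=
  match seq with
  | [] => []                                   -- first stays True: nothing yielded
  | item :: rest => injectIndexesGo missing item missing 0 rest

-- ===== PORT B =====
def inject_indexes_alt (seq : List String) (missing : Option Int) : List (String × Option Int × Int × Option Int) :=
  let n : Int := seq.length
  (PySem.List.enumerate seq 0).map (fun q =>
    (q.2, if q.1 == 0 then missing else some (q.1 - 1), q.1,
     if q.1 == n - 1 then missing else some (q.1 + 1)))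

-- ===== PRECONDITION & SPEC =====
def Spec_inject_indexes (seq : List String) (missing : Option Int) (out : List (String × Option Int × Int × Option Int)) : Prop := out = inject_indexes_alt seq missing
instance (seq : List String) (missing : Option Int) (out : List (String × Option Int × Int × Option Int)) : Decidable (Spec_inject_indexes seq missing out) := by unfold Spec_inject_indexes; infer_instance

-- ===== CLAIM (what is proved, stated in full; the proofs are below) =====
def Claim_equal_inject_indexes : Prop := ∀ (seq : List String) (missing : Option Int), Dom_inject_indexes seq missing → Spec_inject_indexes seq missing (inject_indexes seq missing)

-- ===== LEMMAS AND PROOFS =====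
theorem injectIndexesGo_eq_map (missing : Option Int) :
    ∀ (xs : List String) (p : String) (i L : Int), 0 ≤ i → L = i + xs.length →
    injectIndexesGo missing p (if i == 0 then missing else some (i - 1)) i xs =
      (PySem.List.enumerate (p :: xs) i).map (fun q =>
        (q.2, if q.1 == 0 then missing else some (q.1 - 1), q.1,
         if q.1 == L then missing else some (q.1 + 1))) := by
  intro xs
  induction xs with
  | nil =>
      intro p i L hi hL
      simp only [List.length_nil, Int.natCast_zero, add_zero] at hL
      subst hL
      simp [injectIndexesGo, PySem.List.enumerate_cons, PySem.List.enumerate_nil]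
  | cons x xs ih =>
      intro p i L hi hL
      have h2 : (if (i + 1) == 0 then missing else some (i + 1 - 1)) = some i := by
        have h : ¬ ((i + 1) == 0) = true := by simp; omega
        simp [h]
      have htail := ih x (i + 1) L (by omega)
        (by simp only [List.length_cons] at hL ⊢; push_cast at hL ⊢; omega)
      rw [h2] at htail
      simp only [injectIndexesGo, PySem.List.enumerate_cons, List.map_cons]
      rw [if_neg (by simp only [List.length_cons] at hL; push_cast at hL; simp; omega :
        ¬ ((i == L) = true))]
      exact congrArg _ htail

-- ===== VERDICT (by name: the statement is the Claim_ definition above) =====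
theorem inject_indexes_spec : Claim_equal_inject_indexes := by
  intro seq missing _
  unfold Spec_inject_indexes inject_indexes inject_indexes_alt
  match seq with
  | [] => simp [PySem.List.enumerate_nil]
  | x :: xs =>
      have := injectIndexesGo_eq_map missing xs x 0 ((((x :: xs).length : Int)) - 1)
        le_rfl (by simp only [List.length_cons]; push_cast; omega)
      simpa using this
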